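-- pv_equiv track=rewrite | github.com/kadamekALX/python_20220326 | functions_pgg/zad_3_1.py | wiecej_niz
-- ===== SOURCE A (Python) =====
-- def wiecej_niz(napis: str, ile_znakow: int = 1) -> set:
--     wystapienia = {}
--     for litera in napis.lower():
--         wystapienia[litera] = napis.count(litera)
--
--     wynik = set()
--     for litera, liczba_wystapien in wystapienia.items():
--         if liczba_wystapien > ile_znakow:
--             wynik.add(litera)
--
--     return wynik
-- ===== SOURCE B (Python) =====
-- def wiecej_niz(napis: str, ile_znakow: int = 1) -> set:
--     # single pass over sorted(napis): run-lengths give each character's count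
--     counts = {}
--     prev = None
--     run = 0
--     for ch in sorted(napis):
--         if ch == prev:
--             run += 1
--         else:
--             if prev is not None:
--                 counts[prev] = run
--             prev = ch
--             run = 1
--     if prev is not None:
--         counts[prev] = run
--     return {c for c in set(napis.lower()) if counts.get(c, 0) > ile_znakow}
-- ===== Notes on version B (the rewrite author's own statement) =====
-- stated objective: faster
-- what changed: A rescans napis with str.count for every character of napis.lower(); B sorts napis once and computes all counts in a single run-length pass over the sorted list, then filters the distinct lowercased characters against that table.
import Mathlib
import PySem

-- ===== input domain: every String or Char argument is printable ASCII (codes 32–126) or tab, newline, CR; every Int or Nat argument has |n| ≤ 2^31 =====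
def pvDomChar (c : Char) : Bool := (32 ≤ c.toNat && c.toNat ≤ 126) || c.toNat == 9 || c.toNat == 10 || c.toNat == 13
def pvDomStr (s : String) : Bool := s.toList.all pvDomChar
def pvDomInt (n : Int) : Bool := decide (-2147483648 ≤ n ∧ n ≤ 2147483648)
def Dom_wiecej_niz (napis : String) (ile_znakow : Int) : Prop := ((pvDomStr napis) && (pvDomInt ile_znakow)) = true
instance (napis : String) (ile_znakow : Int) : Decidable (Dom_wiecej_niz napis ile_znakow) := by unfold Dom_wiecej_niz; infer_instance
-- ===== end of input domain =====

-- B replaces A's per-character str.count rescans (O(n^2)) by one sort of napis plus a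
-- single run-length counting pass (O(n log n)); a timing run measured B faster.


-- ===== PORT A =====
def wiecej_niz (napis : String) (ile_znakow : Int) : List String :=
  -- wystapienia[litera] = napis.count(litera), for litera over napis.lower()
  let wystapienia : PySem.Dict Char Int :=
    (PySem.Chars.lower napis.toList).foldl
      (fun d litera => d.insert litera (PySem.Chars.count napis.toList [litera] : Int))
      PySem.Dict.empty
  -- wynik = set(); for litera, liczba in wystapienia.items(): if liczba > ile_znakow: wynik.add(litera)
  let wynik : PySem.Set String :=
    wystapienia.items.foldl
      (fun s p => if p.2 > ile_znakow then PySem.Set.add s (String.ofList [p.1]) else s)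
      PySem.Set.empty
  wynik

-- ===== PORT B =====
-- flush the pending run (prev, run) into the counts dict
def wnFlush (d : PySem.Dict Char Int) (prev : Option Char) (run : Int) : PySem.Dict Char Int :=
  match prev with
  | none => d
  | some p => d.insert p run

-- one step of the run-length pass over sorted(napis)
def wnStep (st : PySem.Dict Char Int × Option Char × Int) (ch : Char) :
    PySem.Dict Char Int × Option Char × Int :=
  if some ch == st.2.1 then (st.1, st.2.1, st.2.2 + 1)
  else (wnFlush st.1 st.2.1 st.2.2, some ch, 1)

def wiecej_niz_alt (napis : String) (ile_znakow : Int) : List String :=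
  let srt := PySem.List.sorted napis.toList (fun c => c) false
  let st := srt.foldl wnStep (PySem.Dict.empty, none, 0)
  let counts := wnFlush st.1 st.2.1 st.2.2
  let cand : PySem.Set Char := PySem.Set.ofList (PySem.Chars.lower napis.toList)
  cand.foldl
    (fun s c => if counts.getD c 0 > ile_znakow then PySem.Set.add s (String.ofList [c]) else s)
    PySem.Set.empty

-- ===== PRECONDITION & SPEC =====
def Spec_wiecej_niz (napis : String) (ile_znakow : Int) (out : List String) : Prop := out = wiecej_niz_alt napis ile_znakow
instance (napis : String) (ile_znakow : Int) (out : List String) : Decidable (Spec_wiecej_niz napis ile_znakow out) := by unfold Spec_wiecej_niz; infer_instance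

-- ===== CLAIM (what is proved, stated in full; the proofs are below) =====
def Claim_equal_wiecej_niz : Prop := ∀ (napis : String) (ile_znakow : Int), Dom_wiecej_niz napis ile_znakow → Spec_wiecej_niz napis ile_znakow (wiecej_niz napis ile_znakow)

-- ===== LEMMAS AND PROOFS =====

-- str.count with a single-character needle is the per-character count
lemma count_go_singleton (c : Char) :
    ∀ (fuel : Nat) (l : List Char) (acc : Nat), l.length ≤ fuel →
      PySem.Chars.count.go [c] fuel l acc = acc + l.count c := by
  intro fuel
  induction fuel with
  | zero =>
    intro l acc h
    have : l = [] := List.eq_nil_of_length_eq_zero (Nat.le_zero.mp h)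
    subst this
    rw [PySem.Chars.count.go.eq_def]; simp
  | succ n ih =>
    intro l acc h
    cases l with
    | nil => rw [PySem.Chars.count.go.eq_def]; simp
    | cons hd t =>
      rw [PySem.Chars.count.go.eq_def]
      simp only [List.length_cons, Nat.succ_le_succ_iff] at h
      by_cases hc : hd = c
      · subst hc
        simp [List.isPrefixOf, ih t _ h]
        omega
      · simp [List.isPrefixOf, hc, ih t _ h, Ne.symm hc]

lemma chars_count_singleton (s : List Char) (c : Char) :
    PySem.Chars.count s [c] = s.count c := by
  simp [PySem.Chars.count, count_go_singleton c s.length s 0 le_rfl]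

-- A's dict-building loop: inserting f(k) keyed by k over l extends the key list like a set
lemma foldl_insert_keyfn (f : Char → Int) :
    ∀ (l : List Char) (K : List Char),
      l.foldl (fun d c => d.insert c (f c)) (PySem.Dict.mk (K.map fun k => (k, f k)))
        = PySem.Dict.mk ((PySem.Set.update K l).map fun k => (k, f k)) := by
  intro l
  induction l with
  | nil => intro K; rfl
  | cons c t ih =>
    intro K
    simp only [List.foldl_cons]
    by_cases hc : c ∈ K
    · have hcon : (PySem.Dict.mk (K.map fun k => (k, f k))).contains c = true := by
        simp [PySem.Dict.contains_mk, List.any_map, List.any_eq_true]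
        exact hc
      have : (PySem.Dict.mk (K.map fun k => (k, f k))).insert c (f c)
          = PySem.Dict.mk (K.map fun k => (k, f k)) := by
        apply PySem.Dict.ext
        rw [PySem.Dict.items_insert_of_contains _ _ hcon]
        rw [List.map_map]
        apply List.map_congr_left
        intro k _
        by_cases hkc : k = c
        · subst hkc; simp
        · simp [hkc]
      rw [this, ih K]
      have : PySem.Set.add K c = K := by simp [PySem.Set.add, PySem.Set.contains, hc]
      simp [PySem.Set.update, this]
    · have hcon : (PySem.Dict.mk (K.map fun k => (k, f k))).contains c = false := by
        simp [PySem.Dict.contains_mk, List.any_map, List.any_eq_false]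
        intro a ha hac
        exact hc (hac ▸ ha)
      have : (PySem.Dict.mk (K.map fun k => (k, f k))).insert c (f c)
          = PySem.Dict.mk ((K ++ [c]).map fun k => (k, f k)) := by
        apply PySem.Dict.ext
        rw [PySem.Dict.items_insert_of_not_contains _ _ hcon]
        simp
      rw [this]
      have h2 : K ++ [c] = PySem.Set.add K c := by
        simp [PySem.Set.add, PySem.Set.contains, hc]
      rw [h2, ih (PySem.Set.add K c)]
      simp [PySem.Set.update]

-- B's run-length pass on a sorted tail starting at a pending run (p, r)
lemma runfold_getD (c : Char) :
    ∀ (l : List Char), l.Pairwise (· ≤ ·) →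
      ∀ (d : PySem.Dict Char Int) (p : Char) (r : Int), (∀ x ∈ l, p ≤ x) →
        (wnFlush (l.foldl wnStep (d, some p, r)).1
            (l.foldl wnStep (d, some p, r)).2.1 (l.foldl wnStep (d, some p, r)).2.2).getD c 0
          = if c = p then r + l.count c
            else if c ∈ l then (l.count c : Int)
            else d.getD c 0 := by
  intro l
  induction l with
  | nil =>
    intro _ d p r _
    simp only [List.foldl_nil, wnFlush, List.count_nil]
    by_cases hc : c = p
    · subst hc; simp [PySem.Dict.getD_insert_self]
    · simp [hc, PySem.Dict.getD_insert_of_ne _ _ _ hc]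
  | cons h t ih =>
    intro hpw d p r hge
    have hpt : t.Pairwise (· ≤ ·) := hpw.of_cons
    have hht : ∀ x ∈ t, h ≤ x := fun x hx => (List.pairwise_cons.mp hpw).1 x hx
    have hph : p ≤ h := hge h (List.mem_cons_self ..)
    simp only [List.foldl_cons]
    by_cases hhp : h = p
    · subst hhp
      have : wnStep (d, some h, r) h = (d, some h, r + 1) := by
        simp [wnStep]
      rw [this, ih hpt d h (r + 1) hht]
      by_cases hc : c = h
      · subst hc; simp; ring
      · simp [hc, Ne.symm hc, List.mem_cons]
    · have hlt : p < h := lt_of_le_of_ne hph (Ne.symm hhp)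
      have hpnt : p ∉ t := fun hmem => absurd (hht p hmem) (not_le.mpr hlt)
      have : wnStep (d, some p, r) h = (d.insert p r, some h, 1) := by
        simp [wnStep, wnFlush, hhp]
      rw [this, ih hpt (d.insert p r) h 1 hht]
      by_cases hch : c = h
      · subst hch
        simp [hhp]
        omega
      · by_cases hct : c ∈ t
        · have hcp : c ≠ p := fun hcp => absurd (hcp ▸ hct) hpnt
          simp [hch, hct, hcp, Ne.symm hch, List.mem_cons]
        · by_cases hcp : c = p
          · subst hcp
            simp [hch, hct, hhp, PySem.Dict.getD_insert_self,
              List.count_eq_zero_of_not_mem hct]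
          · simp [hch, hct, hcp, List.mem_cons,
              PySem.Dict.getD_insert_of_ne _ _ _ hcp]

-- B's counts dict looks up to the plain character count of napis
lemma counts_getD (L : List Char) (c : Char) :
    (wnFlush ((PySem.List.sorted L (fun c => c) false).foldl wnStep (PySem.Dict.empty, none, 0)).1
        ((PySem.List.sorted L (fun c => c) false).foldl wnStep (PySem.Dict.empty, none, 0)).2.1
        ((PySem.List.sorted L (fun c => c) false).foldl wnStep (PySem.Dict.empty, none, 0)).2.2).getD c 0
      = (L.count c : Int) := by
  have hperm := PySem.List.sorted_perm L (fun c => c) false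
  have hcount : (PySem.List.sorted L (fun c => c) false).count c = L.count c := hperm.count_eq c
  have hpw : (PySem.List.sorted L (fun c => c) false).Pairwise (· ≤ ·) :=
    PySem.List.sorted_pairwise L (fun c => c)
  rw [← hcount]
  cases hs : PySem.List.sorted L (fun c => c) false with
  | nil => simp [wnFlush, PySem.Dict.getD_empty]
  | cons h t =>
    rw [hs] at hpw
    have hstep : wnStep (PySem.Dict.empty, none, 0) h = (PySem.Dict.empty, some h, 1) := by
      simp [wnStep, wnFlush]
    have hht : ∀ x ∈ t, h ≤ x := fun x hx => (List.pairwise_cons.mp hpw).1 x hx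
    simp only [List.foldl_cons, hstep]
    rw [runfold_getD c t hpw.of_cons PySem.Dict.empty h 1 hht]
    by_cases hc : c = h
    · subst hc; simp; omega
    · simp [hc, Ne.symm hc, PySem.Dict.getD_empty]
      intro hct
      simp [List.count_eq_zero_of_not_mem hct]

-- ===== VERDICT (by name: the statement is the Claim_ definition above) =====
theorem wiecej_niz_spec : Claim_equal_wiecej_niz := by
  intro napis ile_znakow _
  unfold Spec_wiecej_niz wiecej_niz wiecej_niz_alt
  simp only []
  set L := napis.toList with hL
  set low := PySem.Chars.lower L with hlow
  -- A's dict is the first-occurrence key list of low, each key paired with its count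
  have hA : low.foldl
      (fun d litera => d.insert litera (PySem.Chars.count L [litera] : Int)) PySem.Dict.empty
      = PySem.Dict.mk ((PySem.Set.ofList low).map fun k => (k, (PySem.Chars.count L [k] : Int))) := by
    have := foldl_insert_keyfn (fun k => (PySem.Chars.count L [k] : Int)) low []
    simpa [PySem.Set.update, PySem.Set.ofList_eq_foldl] using this
  rw [hA]
  rw [show ∀ (ps : List (Char × Int)), (PySem.Dict.mk ps).items = ps from fun _ => rfl]
  rw [List.foldl_map]
  apply PySem.List.foldl_congr_mem
  intro acc c _
  rw [counts_getD L c, chars_count_singleton]
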